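-- pv_equiv track=rewrite | github.com/hunu12/MALCOM | ncd/transforms.py | hilbert_curves
-- ===== SOURCE A (Python) =====
-- def sgn(x):
--     return (x > 0) - (x < 0)
--
-- def gilbert2d(x, y, ax, ay, bx, by):
--     """Generalized Hilbert ('gilbert') space-filling curve for arbitrary-sized
--     2D rectangular grids.
--     original code is from https://github.com/jakubcerveny/gilbert
--     """
--     scan = []
--
--     w = abs(ax + ay)
--     h = abs(bx + by)
--
--     (dax, day) = (sgn(ax), sgn(ay)) # unit major direction
--     (dbx, dby) = (sgn(bx), sgn(by)) # unit orthogonal direction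
--
--     if h == 1:
--         # trivial row fill
--         for i in range(0, w):
--             scan.append((x, y))
--             (x, y) = (x + dax, y + day)
--         return scan
--
--     if w == 1:
--         # trivial column fill
--         for i in range(0, h):
--             scan.append((x, y))
--             (x, y) = (x + dbx, y + dby)
--         return scan
--
--     (ax2, ay2) = (ax//2, ay//2)
--     (bx2, by2) = (bx//2, by//2)
--
--     w2 = abs(ax2 + ay2)
--     h2 = abs(bx2 + by2)
--
--     if 2*w > 3*h:
--         if (w2 % 2) and (w > 2):
--             # prefer even steps
--             (ax2, ay2) = (ax2 + dax, ay2 + day)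
--
--         # long case: split in two parts only
--         scan += gilbert2d(x, y, ax2, ay2, bx, by)
--         scan += gilbert2d(x+ax2, y+ay2, ax-ax2, ay-ay2, bx, by)
--
--     else:
--         if (h2 % 2) and (h > 2):
--             # prefer even steps
--             (bx2, by2) = (bx2 + dbx, by2 + dby)
--
--         # standard case: one step up, one long horizontal, one step down
--         scan += gilbert2d(x, y, bx2, by2, ax2, ay2)
--         scan += gilbert2d(x+bx2, y+by2, ax, ay, bx-bx2, by-by2)
--         scan += gilbert2d(x+(ax-dax)+(bx2-dbx), y+(ay-day)+(by2-dby),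
--                  -bx2, -by2, -(ax-ax2), -(ay-ay2))
--     return scan
--
-- def hilbert_curves(feature_list):
--     curves = []
--     for _, H, W in feature_list:
--         if W < H:
--             temp_curve = gilbert2d(0, 0, H, 0, 0, W)
--         else:
--             temp_curve = gilbert2d(0, 0, 0, W, H, 0)
--
--         indices = []
--         for i, j in temp_curve:
--             indices.append(i * W + j)
--         curves.append(indices)
--     return curves
-- ===== SOURCE B (Python) =====
-- def sgn(x):
--     return (x > 0) - (x < 0)
--
-- def hilbert_curves(feature_list):
--     curves = []
--     for _, H, W in feature_list:
--         if W < H: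
--             stack = [(0, 0, H, 0, 0, W)]
--         else:
--             stack = [(0, 0, 0, W, H, 0)]
--         indices = []
--         while stack:
--             x, y, ax, ay, bx, by = stack.pop()
--             w = abs(ax + ay)
--             h = abs(bx + by)
--             dax, day = sgn(ax), sgn(ay)
--             dbx, dby = sgn(bx), sgn(by)
--             if h == 1:
--                 for _i in range(w):
--                     indices.append(x * W + y)
--                     x += dax
--                     y += day
--             elif w == 1:
--                 for _i in range(h):
--                     indices.append(x * W + y)
--                     x += dbx
--                     y += dby
--             else:
--                 ax2, ay2 = ax // 2, ay // 2
--                 bx2, by2 = bx // 2, by // 2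
--                 w2 = abs(ax2 + ay2)
--                 h2 = abs(bx2 + by2)
--                 if 2 * w > 3 * h:
--                     if (w2 % 2) and (w > 2):
--                         ax2 += dax
--                         ay2 += day
--                     stack.append((x + ax2, y + ay2, ax - ax2, ay - ay2, bx, by))
--                     stack.append((x, y, ax2, ay2, bx, by))
--                 else:
--                     if (h2 % 2) and (h > 2):
--                         bx2 += dbx
--                         by2 += dby
--                     stack.append((x + (ax - dax) + (bx2 - dbx),
--                                   y + (ay - day) + (by2 - dby),
--                                   -bx2, -by2, -(ax - ax2), -(ay - ay2)))
--                     stack.append((x + bx2, y + by2, ax, ay, bx - bx2, by - by2))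
--                     stack.append((x, y, bx2, by2, ax2, ay2))
--         curves.append(indices)
--     return curves
-- ===== Notes on version B (the rewrite author's own statement) =====
-- stated objective: alternative
-- what changed: gilbert2d's recursion is replaced by an iterative explicit LIFO stack of (x,y,ax,ay,bx,by) frames, pushing sub-rectangles in reverse order and emitting the flat indices i*W+j directly, so both the recursion and the intermediate coordinate-tuple list disappear.
import Mathlib
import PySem

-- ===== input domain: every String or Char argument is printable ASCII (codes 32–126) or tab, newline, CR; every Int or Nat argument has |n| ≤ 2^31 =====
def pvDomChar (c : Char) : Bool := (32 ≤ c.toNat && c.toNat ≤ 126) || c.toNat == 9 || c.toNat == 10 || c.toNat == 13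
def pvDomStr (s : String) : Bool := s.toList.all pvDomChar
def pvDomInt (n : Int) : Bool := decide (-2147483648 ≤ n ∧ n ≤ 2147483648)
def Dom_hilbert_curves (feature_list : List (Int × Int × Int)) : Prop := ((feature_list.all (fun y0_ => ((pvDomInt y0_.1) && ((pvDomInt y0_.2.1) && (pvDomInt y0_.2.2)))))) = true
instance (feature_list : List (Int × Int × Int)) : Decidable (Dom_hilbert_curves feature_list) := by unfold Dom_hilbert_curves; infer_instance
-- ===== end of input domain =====

-- B replaces gilbert2d's recursion by an explicit LIFO stack of frames pushed in reverse
-- order, emitting flat indices i*W+j directly (objective: alternative; same cost).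
-- Both ports carry a fuel argument only to make the recursion total in Lean; on every
-- input satisfying Pre_ the fuel 2*(|H|+|W|)+4 exceeds the Python recursion depth.

-- ===== PORT A =====
-- sgn(x) = (x > 0) - (x < 0)
def pySgn (x : Int) : Int :=
  (if x > 0 then (1 : Int) else 0) - (if x < 0 then (1 : Int) else 0)

-- the trivial row/column fill loop: n cells starting at (x,y), stepping (dx,dy)
def fillA (x y dx dy : Int) : Nat → List (Int × Int)
  | 0 => []
  | n + 1 => (x, y) :: fillA (x + dx) (y + dy) dx dy n

def pvFuel (H W : Int) : Nat := 2 * (H.natAbs + W.natAbs) + 4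

def gilbert2d : Nat → Int → Int → Int → Int → Int → Int → List (Int × Int)
  | 0, _, _, _, _, _, _ => []
  | fuel + 1, x, y, ax, ay, bx, by_ =>
    let w : Int := |ax + ay|
    let h : Int := |bx + by_|
    let dax := pySgn ax
    let day := pySgn ay
    let dbx := pySgn bx
    let dby := pySgn by_
    if h = 1 then
      fillA x y dax day w.toNat
    else if w = 1 then
      fillA x y dbx dby h.toNat
    else
      let ax2 := PySem.Int.floordiv ax 2
      let ay2 := PySem.Int.floordiv ay 2
      let bx2 := PySem.Int.floordiv bx 2
      let by2 := PySem.Int.floordiv by_ 2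
      let w2 : Int := |ax2 + ay2|
      let h2 : Int := |bx2 + by2|
      if 2 * w > 3 * h then
        let ax2 := if PySem.Int.mod w2 2 ≠ 0 ∧ w > 2 then ax2 + dax else ax2
        let ay2 := if PySem.Int.mod w2 2 ≠ 0 ∧ w > 2 then ay2 + day else ay2
        gilbert2d fuel x y ax2 ay2 bx by_ ++
          gilbert2d fuel (x + ax2) (y + ay2) (ax - ax2) (ay - ay2) bx by_
      else
        let bx2 := if PySem.Int.mod h2 2 ≠ 0 ∧ h > 2 then bx2 + dbx else bx2
        let by2 := if PySem.Int.mod h2 2 ≠ 0 ∧ h > 2 then by2 + dby else by2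
        gilbert2d fuel x y bx2 by2 ax2 ay2 ++
          gilbert2d fuel (x + bx2) (y + by2) ax ay (bx - bx2) (by_ - by2) ++
          gilbert2d fuel (x + (ax - dax) + (bx2 - dbx)) (y + (ay - day) + (by2 - dby))
            (-bx2) (-by2) (-(ax - ax2)) (-(ay - ay2))

def hilbert_curves (feature_list : List (Int × Int × Int)) : List (List Int) :=
  feature_list.map (fun t =>
    let H := t.2.1
    let W := t.2.2
    let temp_curve :=
      if W < H then gilbert2d (pvFuel H W) 0 0 H 0 0 W
      else gilbert2d (pvFuel H W) 0 0 0 W H 0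
    temp_curve.map (fun p => p.1 * W + p.2))

-- ===== PORT B =====
-- a stack frame is (x, y, ax, ay, bx, by); each carries its remaining fuel
def fillB (W x y dx dy : Int) : Nat → List Int
  | 0 => []
  | n + 1 => (x * W + y) :: fillB W (x + dx) (y + dy) dx dy n

def pvStackMeasure (stack : List (Nat × (Int × Int × Int × Int × Int × Int))) : Nat :=
  (stack.map (fun e => 4 ^ e.1)).sum

def runStack (W : Int) (stack : List (Nat × (Int × Int × Int × Int × Int × Int)))
    (indices : List Int) : List Int :=
  match stack with
  | [] => indices
  | (0, _) :: rest => runStack W rest indices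
  | (fuel + 1, (x, y, ax, ay, bx, by_)) :: rest =>
    let w : Int := |ax + ay|
    let h : Int := |bx + by_|
    let dax := pySgn ax
    let day := pySgn ay
    let dbx := pySgn bx
    let dby := pySgn by_
    if h = 1 then
      runStack W rest (indices ++ fillB W x y dax day w.toNat)
    else if w = 1 then
      runStack W rest (indices ++ fillB W x y dbx dby h.toNat)
    else
      let ax2 := PySem.Int.floordiv ax 2
      let ay2 := PySem.Int.floordiv ay 2
      let bx2 := PySem.Int.floordiv bx 2
      let by2 := PySem.Int.floordiv by_ 2
      let w2 : Int := |ax2 + ay2|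
      let h2 : Int := |bx2 + by2|
      if 2 * w > 3 * h then
        let ax2 := if PySem.Int.mod w2 2 ≠ 0 ∧ w > 2 then ax2 + dax else ax2
        let ay2 := if PySem.Int.mod w2 2 ≠ 0 ∧ w > 2 then ay2 + day else ay2
        runStack W ((fuel, (x, y, ax2, ay2, bx, by_)) ::
                    (fuel, (x + ax2, y + ay2, ax - ax2, ay - ay2, bx, by_)) :: rest) indices
      else
        let bx2 := if PySem.Int.mod h2 2 ≠ 0 ∧ h > 2 then bx2 + dbx else bx2
        let by2 := if PySem.Int.mod h2 2 ≠ 0 ∧ h > 2 then by2 + dby else by2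
        runStack W ((fuel, (x, y, bx2, by2, ax2, ay2)) ::
                    (fuel, (x + bx2, y + by2, ax, ay, bx - bx2, by_ - by2)) ::
                    (fuel, (x + (ax - dax) + (bx2 - dbx), y + (ay - day) + (by2 - dby),
                            -bx2, -by2, -(ax - ax2), -(ay - ay2))) :: rest) indices
  termination_by pvStackMeasure stack
  decreasing_by
  all_goals
    simp only [pvStackMeasure, List.map_cons, List.sum_cons, pow_succ]
    first
    | omega
    | (have h4 : 0 < 4 ^ fuel := by positivity
       omega)

def hilbert_curves_alt (feature_list : List (Int × Int × Int)) : List (List Int) :=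
  feature_list.map (fun t =>
    let H := t.2.1
    let W := t.2.2
    let start := if W < H then ((0 : Int), (0 : Int), H, (0 : Int), (0 : Int), W)
                 else ((0 : Int), (0 : Int), (0 : Int), W, H, (0 : Int))
    runStack W [(pvFuel H W, start)] [])

-- ===== PRECONDITION & SPEC =====
-- Pre_ excludes exactly the entries with H = 0 and W = 0, on which Python A hits
-- infinite recursion (RecursionError); on every other input A returns.
def Pre_hilbert_curves (feature_list : List (Int × Int × Int)) : Prop :=
  ∀ t ∈ feature_list, ¬ (t.2.1 = 0 ∧ t.2.2 = 0)

instance (feature_list : List (Int × Int × Int)) : Decidable (Pre_hilbert_curves feature_list) := by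
  unfold Pre_hilbert_curves; infer_instance

def pvWitness_hilbert_curves : (List (Int × Int × Int)) := [(0, 2, 3), (1, 4, 4)]

def Spec_hilbert_curves (feature_list : List (Int × Int × Int)) (out : List (List Int)) : Prop :=
  out = hilbert_curves_alt feature_list

instance (feature_list : List (Int × Int × Int)) (out : List (List Int)) : Decidable (Spec_hilbert_curves feature_list out) := by
  unfold Spec_hilbert_curves; infer_instance

-- ===== CLAIM (what is proved, stated in full; the proofs are below) =====
def Claim_equal_hilbert_curves : Prop := ∀ (feature_list : List (Int × Int × Int)), Dom_hilbert_curves feature_list → Pre_hilbert_curves feature_list → Spec_hilbert_curves feature_list (hilbert_curves feature_list)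

-- ===== LEMMAS AND PROOFS =====

-- fillB is fillA with the flat index fused in
theorem fillB_eq_map (W x y dx dy : Int) (n : Nat) :
    fillB W x y dx dy n = (fillA x y dx dy n).map (fun p => p.1 * W + p.2) := by
  induction n generalizing x y with
  | zero => simp [fillA, fillB]
  | succ n ih => simp [fillA, fillB, ih]

-- popping a frame emits exactly the map of gilbert2d on that frame
theorem runStack_cons (W : Int) (n : Nat) :
    ∀ (x y ax ay bx by_ : Int) rest ind,
      runStack W ((n, (x, y, ax, ay, bx, by_)) :: rest) ind =
        runStack W rest (ind ++ (gilbert2d n x y ax ay bx by_).map (fun p => p.1 * W + p.2)) := by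
  induction n with
  | zero => intro x y ax ay bx by_ rest ind; simp [runStack, gilbert2d]
  | succ n ih =>
    intro x y ax ay bx by_ rest ind
    rw [runStack, gilbert2d]
    split_ifs with h1 h2 h3
    · rw [fillB_eq_map]
    · rw [fillB_eq_map]
    · rw [ih, ih]
      simp [List.map_append, List.append_assoc]
    · rw [ih, ih, ih]
      simp [List.map_append, List.append_assoc]

theorem runStack_nil (W : Int) (ind : List Int) : runStack W [] ind = ind := by
  rw [runStack]

-- ===== VERDICT (by name: the statement is the Claim_ definition above) =====
theorem hilbert_curves_spec : Claim_equal_hilbert_curves := by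
  intro fl _ _
  unfold Spec_hilbert_curves hilbert_curves hilbert_curves_alt
  refine List.map_congr_left ?_
  intro t _
  simp only []
  split_ifs with h
  · rw [runStack_cons, runStack_nil, List.nil_append]
  · rw [runStack_cons, runStack_nil, List.nil_append]
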